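-- pv_equiv track=rewrite | github.com/cizins/2026-python | weeks/week-07/solutions/1114405042/solution_10071.py | solve
-- ===== SOURCE A (Python) =====
-- def solve(n: int, s: list) -> int:
--     """
--     計算 a + b + c + d + e = f 的六元組數量。
--     使用中途相遇法 (Meet-in-the-Middle) 將複雜度降至 O(N^3)。
--
--     :param n: 集合 S 的元素個數
--     :param s: 包含集合 S 元素的串列
--     :return: 符合條件的六元組數量
--     """
--     # 使用字典 (dict) 記錄左邊 a + b + c 所有可能總和的出現次數
--     left_counts = {}
--
--     # 窮舉 a, b, c (時間複雜度 O(N^3))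
--     for a in s:
--         for b in s:
--             for c in s:
--                 val = a + b + c
--                 if val in left_counts:
--                     left_counts[val] += 1
--                 else:
--                     left_counts[val] = 1
--
--     ans = 0
--     # 窮舉 f, d, e (時間複雜度 O(N^3))
--     # 若 f - d - e 的值存在於 left_counts 中，代表找到符合的組合
--     for f in s:
--         for d in s:
--             for e in s:
--                 target = f - d - e
--                 if target in left_counts:
--                     ans += left_counts[target]
--
--     return ans
-- ===== SOURCE B (Python) =====
-- def solve(n: int, s: list) -> int:
--     # Distribution-based meet-in-the-middle: collapse raw element loops into
--     # dictionaries of sum -> multiplicity and combine distributions.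
--     P = {}                      # distribution of d + e over ordered pairs, O(N^2)
--     for x in s:
--         for y in s:
--             P[x + y] = P.get(x + y, 0) + 1
--     L = {}                      # distribution of a + b + c, derived from P in O(|P| * N)
--     for v, pv in P.items():
--         for c in s:
--             L[v + c] = L.get(v + c, 0) + pv
--     ans = 0                     # combine: for each f, convolve L against P, O(N * |P|)
--     for f in s:
--         for w, pw in P.items():
--             ans += L.get(f - w, 0) * pw
--     return ans
-- ===== Notes on version B (the rewrite author's own statement) =====
-- stated objective: faster
-- what changed: Replaces A's two raw O(N^3) loops over elements (triples a,b,c and f,d,e) by distribution arithmetic: a pair-sum counter P built in O(N^2), a triple-sum distribution L derived by convolving P with s, and the answer obtained by convolving L against P over collapsed distinct sum keys weighted by multiplicities.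
import Mathlib
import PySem

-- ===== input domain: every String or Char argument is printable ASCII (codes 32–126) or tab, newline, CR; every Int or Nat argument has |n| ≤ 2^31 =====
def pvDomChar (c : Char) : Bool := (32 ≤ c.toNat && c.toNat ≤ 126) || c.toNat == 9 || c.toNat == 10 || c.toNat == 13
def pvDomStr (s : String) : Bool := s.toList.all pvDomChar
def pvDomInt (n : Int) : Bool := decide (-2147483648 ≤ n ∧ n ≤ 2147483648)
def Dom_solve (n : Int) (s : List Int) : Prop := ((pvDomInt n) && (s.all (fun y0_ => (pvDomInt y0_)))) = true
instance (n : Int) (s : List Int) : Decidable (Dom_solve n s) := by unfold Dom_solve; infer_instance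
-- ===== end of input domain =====

-- B replaces A's two raw triple element loops by sum->multiplicity distributions
-- (pair-sum distribution P, triple-sum distribution L derived from P) and combines
-- the distributions weighted by multiplicity over distinct sum keys; same return value, measured faster.

-- ===== PORT A =====
def solve (n : Int) (s : List Int) : Int :=
  let left_counts : PySem.Dict Int Int :=
    s.foldl (fun d a => s.foldl (fun d b => s.foldl (fun d c =>
      let val := a + b + c
      if d.contains val then d.insert val (d.getD val 0 + 1)
      else d.insert val 1) d) d) PySem.Dict.empty
  s.foldl (fun ans f => s.foldl (fun ans d' => s.foldl (fun ans e =>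
      let target := f - d' - e
      if left_counts.contains target then ans + left_counts.getD target 0
      else ans) ans) ans) 0

-- ===== PORT B =====
def solve_alt (n : Int) (s : List Int) : Int :=
  let P : PySem.Dict Int Int :=
    s.foldl (fun d x => s.foldl (fun d y =>
      d.insert (x + y) (d.getD (x + y) 0 + 1)) d) PySem.Dict.empty
  let L : PySem.Dict Int Int :=
    P.items.foldl (fun d p => s.foldl (fun d c =>
      d.insert (p.1 + c) (d.getD (p.1 + c) 0 + p.2)) d) PySem.Dict.empty
  s.foldl (fun ans f => P.items.foldl (fun ans p =>
      ans + L.getD (f - p.1) 0 * p.2) ans) 0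

-- ===== PRECONDITION & SPEC =====
def Spec_solve (n : Int) (s : List Int) (out : Int) : Prop := out = solve_alt n s
instance (n : Int) (s : List Int) (out : Int) : Decidable (Spec_solve n s out) := by unfold Spec_solve; infer_instance

-- ===== CLAIM (what is proved, stated in full; the proofs are below) =====
def Claim_equal_solve : Prop := ∀ (n : Int) (s : List Int), Dom_solve n s → Spec_solve n s (solve n s)

-- ===== LEMMAS AND PROOFS =====

-- the list of all ordered pair sums, resp. ordered triple sums, of s
def pvPairs (s : List Int) : List Int := s.flatMap (fun x => s.map (fun y => x + y))
def pvTriples (s : List Int) : List Int := (pvPairs s).flatMap (fun w => s.map (fun c => w + c))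
-- number of ordered triples of elements of s summing to u
def pvT (s : List Int) (u : Int) : Int := ((pvTriples s).count u : Int)

-- getD after a weighted insert-accumulate loop: sums the weights recorded at the key
lemma getD_insfold (l : List (Int × Int)) (d : PySem.Dict Int Int) (u : Int) :
    (l.foldl (fun d q => d.insert q.1 (d.getD q.1 0 + q.2)) d).getD u 0
    = d.getD u 0 + ((l.filter (fun q => q.1 == u)).map (·.2)).sum := by
  induction l generalizing d with
  | nil => simp
  | cons q t ih =>
    simp only [List.foldl_cons, ih, List.filter_cons]
    by_cases h : q.1 = u
    · simp [h]; ring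
    · simp [PySem.Dict.getD_insert, h, Ne.symm h]

-- summing g over a list = summing count·g over its distinct elements
lemma sum_weighted_dedup (xs : List Int) (g : Int → Int) :
    ((PySem.Set.ofList xs).map (fun k => (xs.count k : Int) * g k)).sum
    = (xs.map g).sum := by
  rw [Finset.sum_list_map_count xs g]
  rw [← List.sum_toFinset _ (PySem.Set.nodup_ofList xs)]
  have hfs : List.toFinset (PySem.Set.ofList xs) = xs.toFinset := by
    ext a; simp [PySem.Set.mem_ofList]
  rw [hfs]
  exact Finset.sum_congr rfl (fun m _ => by simp)

-- the triple-sum count, re-expressed as a sum over the pair-sum list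
lemma count_triples (s : List Int) (u : Int) :
    pvT s u = ((pvPairs s).map (fun p => ((s.countP (fun c => p + c == u) : Nat) : Int))).sum := by
  unfold pvT pvTriples
  rw [show ((pvPairs s).flatMap (fun w => s.map (fun c => w + c))).count u
      = ((pvPairs s).map (fun w => (s.map (fun c => w + c)).count u)).sum from by
    simp only [List.count_flatMap]; rfl]
  push_cast
  rw [List.map_map]
  refine congrArg List.sum (List.map_congr_left ?_)
  intro w _
  simp only [List.count_eq_countP, List.countP_map]
  rfl

lemma sum_flatMap {α : Type} (l : List α) (h : α → List Int) :
    (l.flatMap h).sum = (l.map (fun x => (h x).sum)).sum := by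
  induction l with
  | nil => rfl
  | cons a t ih => simp [List.flatMap_cons, ih]

-- A's left_counts dict is the counter of all ordered triple sums
lemma lcA_eq_counter (s : List Int) :
    s.foldl (fun d a => s.foldl (fun d b => s.foldl (fun d c =>
      let val := a + b + c
      if d.contains val then d.insert val (d.getD val 0 + 1)
      else d.insert val 1) d) d) PySem.Dict.empty
    = PySem.Dict.counter (pvTriples s) := by
  rw [← PySem.Dict.foldl_insert_getD_add_one_eq_counter]
  unfold pvTriples pvPairs
  simp only [List.foldl_flatMap, List.foldl_map]
  have hstep : ∀ (d : PySem.Dict Int Int) (v : Int),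
      (if d.contains v then d.insert v (d.getD v 0 + 1) else d.insert v 1)
      = d.insert v (d.getD v 0 + 1) := by
    intro d v
    by_cases h : d.contains v
    · simp [h]
    · have hc : d.contains v = false := by simpa using h
      rw [if_neg (by simp [hc]), PySem.Dict.getD_of_not_contains (d := d) (k := v) (d0 := 0) hc]
      norm_num
  simp only [hstep]

-- B's P dict is the counter of all ordered pair sums
lemma pB_eq_counter (s : List Int) :
    s.foldl (fun d x => s.foldl (fun d y =>
      d.insert (x + y) (d.getD (x + y) 0 + 1)) d) PySem.Dict.empty
    = PySem.Dict.counter (pvPairs s) := by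
  rw [← PySem.Dict.foldl_insert_getD_add_one_eq_counter]
  unfold pvPairs
  rw [List.foldl_flatMap]
  simp [List.foldl_map]

-- B's L dict looks up the ordered-triple-sum counts
lemma lB_getD (s : List Int) (u : Int) :
    ((PySem.Dict.counter (pvPairs s)).items.foldl (fun d p => s.foldl (fun d c =>
      d.insert (p.1 + c) (d.getD (p.1 + c) 0 + p.2)) d) PySem.Dict.empty).getD u 0
    = pvT s u := by
  have hflat : (PySem.Dict.counter (pvPairs s)).items.foldl (fun d p => s.foldl (fun d c =>
      d.insert (p.1 + c) (d.getD (p.1 + c) 0 + p.2)) d) PySem.Dict.empty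
      = ((PySem.Dict.counter (pvPairs s)).items.flatMap (fun p => s.map (fun c => (p.1 + c, p.2)))).foldl
          (fun d q => d.insert q.1 (d.getD q.1 0 + q.2)) PySem.Dict.empty := by
    rw [List.foldl_flatMap]
    simp [List.foldl_map]
  rw [hflat, getD_insfold, PySem.Dict.getD_empty, zero_add]
  rw [PySem.Dict.items_counter, count_triples]
  have hinner : ∀ k w : Int,
      (((s.map (fun c => (k + c, w))).filter (fun q => q.1 == u)).map (fun x => x.2)).sum
      = w * ((s.countP (fun c => k + c == u) : Nat) : Int) := by
    intro k w
    simp [List.filter_map, List.map_map, Function.comp_def, List.sum_replicate, mul_comm]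
    exact Or.inl List.countP_eq_length_filter.symm
  rw [List.filter_flatMap, List.map_flatMap, sum_flatMap, List.map_map]
  rw [List.map_congr_left (fun k _ => by
    simpa using hinner k ((pvPairs s).count k : Int))]
  exact sum_weighted_dedup (pvPairs s) (fun k => ((s.countP (fun c => k + c == u) : Nat) : Int))

-- A's value as a triple sum of triple-sum counts
lemma solveA_eq (n : Int) (s : List Int) :
    solve n s
    = (s.map (fun f => (s.map (fun d' => (s.map (fun e =>
        pvT s (f - d' - e))).sum)).sum)).sum := by
  unfold solve
  rw [lcA_eq_counter]
  have hstep2 : ∀ (ans t : Int),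
      (if (PySem.Dict.counter (pvTriples s)).contains t
       then ans + (PySem.Dict.counter (pvTriples s)).getD t 0 else ans)
      = ans + (PySem.Dict.counter (pvTriples s)).getD t 0 := by
    intro ans t
    by_cases h : (PySem.Dict.counter (pvTriples s)).contains t
    · rw [if_pos h]
    · have hc : (PySem.Dict.counter (pvTriples s)).contains t = false := by simpa using h
      rw [if_neg (by simp [hc]),
        PySem.Dict.getD_of_not_contains (d := PySem.Dict.counter (pvTriples s)) (k := t) (d0 := 0) hc,
        add_zero]
  simp only [hstep2]
  simp only [PySem.List.foldl_add, zero_add, PySem.Dict.getD_counter, pvT]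

-- B's value as the same triple sum of triple-sum counts
lemma solveB_eq (n : Int) (s : List Int) :
    solve_alt n s
    = (s.map (fun f => (s.map (fun d' => (s.map (fun e =>
        pvT s (f - d' - e))).sum)).sum)).sum := by
  unfold solve_alt
  rw [pB_eq_counter]
  simp only [PySem.List.foldl_add, zero_add]
  rw [List.map_congr_left (fun f _ => by
    rw [List.map_congr_left (fun p _ => by rw [lB_getD s (f - p.1)])])]
  rw [List.map_congr_left (fun f _ => by
    rw [PySem.Dict.items_counter, List.map_map,
      List.map_congr_left (fun k _ => by
        show pvT s (f - k) * ((pvPairs s).count k : Int) = _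
        rw [mul_comm]),
      sum_weighted_dedup (pvPairs s) (fun k => pvT s (f - k))])]
  unfold pvPairs
  simp only [List.map_flatMap, List.map_map, sum_flatMap, Function.comp_def,
    sub_add_eq_sub_sub]

-- ===== VERDICT (by name: the statement is the Claim_ definition above) =====
theorem solve_spec : Claim_equal_solve := by
  intro n s _
  unfold Spec_solve
  rw [solveA_eq, solveB_eq]
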